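-- pv_equiv track=rewrite | github.com/dMedinaO/recursiveBinaryCurves | build/lib.linux-x86_64-2.7/modulesRV/clustering_analysis/callService.py | checkMembersDistributionCluster
-- ===== SOURCE A (Python) =====
-- def checkMembersDistributionCluster(labels):
--
--     label1 = 0
--     label2 = 0
--
--     for label in labels:
--         if label == 0:
--             label1+=1
--         else:
--             label2+=1
--
--     return label1, label2
-- ===== SOURCE B (Python) =====
-- def checkMembersDistributionCluster(labels):
--     # Divide and conquer: split in half, solve each half recursively, add the pairs.
--     n = len(labels)
--     if n == 0:
--         return 0, 0
--     if n == 1: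
--         return (1, 0) if labels[0] == 0 else (0, 1)
--     mid = n // 2
--     l1, l2 = checkMembersDistributionCluster(labels[:mid])
--     r1, r2 = checkMembersDistributionCluster(labels[mid:])
--     return l1 + r1, l2 + r2
-- ===== Notes on version B (the rewrite author's own statement) =====
-- stated objective: alternative
-- what changed: Replaces A's linear two-counter loop with a divide-and-conquer recursion that splits the list in half, counts each half recursively, and adds the resulting pairs.
import Mathlib
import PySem

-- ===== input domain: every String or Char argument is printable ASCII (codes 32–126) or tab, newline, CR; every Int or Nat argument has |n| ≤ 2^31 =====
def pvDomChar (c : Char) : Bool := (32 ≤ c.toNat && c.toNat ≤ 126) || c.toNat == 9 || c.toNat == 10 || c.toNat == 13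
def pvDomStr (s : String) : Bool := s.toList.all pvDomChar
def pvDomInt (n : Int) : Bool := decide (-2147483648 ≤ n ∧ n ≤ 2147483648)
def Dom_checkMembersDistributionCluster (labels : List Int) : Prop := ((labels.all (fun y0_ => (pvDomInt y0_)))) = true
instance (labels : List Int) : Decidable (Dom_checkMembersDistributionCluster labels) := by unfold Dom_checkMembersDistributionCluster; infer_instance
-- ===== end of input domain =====

-- B replaces A's linear two-counter loop with a divide-and-conquer recursion (split in half, add pair results); objective: alternative.


-- ===== PORT A =====
def checkMembersDistributionCluster (labels : List Int) : Int × Int :=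
  labels.foldl (fun (st : Int × Int) label =>
    if label == 0 then (st.1 + 1, st.2) else (st.1, st.2 + 1)) (0, 0)

-- ===== PORT B =====
-- labels[:mid] / labels[mid:] with 0 ≤ mid ≤ len are exactly List.take mid / List.drop mid.
def checkMembersDistributionCluster_alt (labels : List Int) : Int × Int :=
  if labels.length = 0 then (0, 0)
  else if labels.length = 1 then (if labels.headI == 0 then (1, 0) else (0, 1))
  else
    let mid := labels.length / 2
    let l := checkMembersDistributionCluster_alt (labels.take mid)
    let r := checkMembersDistributionCluster_alt (labels.drop mid)
    (l.1 + r.1, l.2 + r.2)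
termination_by labels.length
decreasing_by
  all_goals simp only [List.length_take, List.length_drop]; omega

-- ===== PRECONDITION & SPEC =====
def Spec_checkMembersDistributionCluster (labels : List Int) (out : Int × Int) : Prop := out = checkMembersDistributionCluster_alt labels
instance (labels : List Int) (out : Int × Int) : Decidable (Spec_checkMembersDistributionCluster labels out) := by unfold Spec_checkMembersDistributionCluster; infer_instance

-- ===== CLAIM =====
def Claim_equal_checkMembersDistributionCluster : Prop := ∀ (labels : List Int), Dom_checkMembersDistributionCluster labels → Spec_checkMembersDistributionCluster labels (checkMembersDistributionCluster labels)

-- ===== LEMMAS AND PROOFS =====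
theorem foldA_eq (labels : List Int) (a b : Int) :
    labels.foldl (fun (st : Int × Int) label =>
      if label == 0 then (st.1 + 1, st.2) else (st.1, st.2 + 1)) (a, b)
    = (a + PySem.List.count labels 0, b + ((labels.length : Int) - PySem.List.count labels 0)) := by
  induction labels generalizing a b with
  | nil => simp [PySem.List.count]
  | cons h t ih =>
      by_cases h0 : h = 0
      · simp only [List.foldl, h0, if_pos (by simp : ((0:Int) == 0) = true)]
        rw [ih]
        simp [PySem.List.count, Prod.ext_iff]
        ring
      · simp only [List.foldl]
        rw [if_neg (by simpa using h0)]
        rw [ih]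
        simp [PySem.List.count, h0, Prod.ext_iff]
        ring

theorem alt_eq (labels : List Int) :
    checkMembersDistributionCluster_alt labels
    = ((PySem.List.count labels 0 : Int), (labels.length : Int) - PySem.List.count labels 0) := by
  fun_induction checkMembersDistributionCluster_alt labels with
  | case1 labels h0 =>
      obtain rfl : labels = [] := List.length_eq_zero_iff.mp h0
      simp [PySem.List.count]
  | case2 labels h0 h1 hh =>
      obtain ⟨x, rfl⟩ := List.length_eq_one_iff.mp h1
      have hx : x = 0 := by simpa [List.headI] using hh
      subst hx
      simp [PySem.List.count]
  | case3 labels h0 h1 hh =>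
      obtain ⟨x, rfl⟩ := List.length_eq_one_iff.mp h1
      have hx : ¬ x = 0 := by simpa [List.headI] using hh
      simp [PySem.List.count, hx]
  | case4 labels h0 h1 mid lres rres ihl ihr =>
      simp only [lres, rres, ihl, ihr]
      have hc : PySem.List.count labels 0
          = PySem.List.count (labels.take mid) 0
            + PySem.List.count (labels.drop mid) 0 := by
        simp only [PySem.List.count]
        rw [← List.count_append, List.take_append_drop]
      have hlen : labels.length
          = (labels.take mid).length + (labels.drop mid).length := by
        simp only [List.length_take, List.length_drop]
        omega
      simp only [Prod.ext_iff]
      constructor <;> omega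

-- ===== VERDICT =====
theorem checkMembersDistributionCluster_spec : Claim_equal_checkMembersDistributionCluster := by
  intro labels _
  show _ = _
  rw [checkMembersDistributionCluster, foldA_eq, alt_eq]
  norm_num
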